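-- pv_equiv track=rewrite | github.com/Fylipp/vending-machine | vm_gen.py | progress_step
-- ===== SOURCE A (Python) =====
-- def progress_step(start, stop, step):
--     nodes = set()
--     edges = set()
--     node = start
--     old_node = None
--
--     while node <= stop:
--         if old_node is not None:
--             edges.add((old_node, node))
--
--         nodes.add(node)
--
--         old_node = node
--         node += step
--
--     return nodes, edges
-- ===== SOURCE B (Python) =====
-- def progress_step(start, stop, step):
--     # Closed form: compute the number of nodes directly, then generate nodes and
--     # edges by index arithmetic instead of stepping through the sequence.
--     n = (stop - start) // step + 1 if step > 0 else 0
--     nodes = {start + i * step for i in range(n)}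
--     edges = {(start + i * step, start + (i + 1) * step) for i in range(n - 1)}
--     return nodes, edges
-- ===== Notes on version B (the rewrite author's own statement) =====
-- stated objective: alternative
-- what changed: B replaces A's while-loop with repeated addition and an old_node tracker by a closed-form node count n = (stop-start)//step + 1 and generates nodes and edges directly by index arithmetic over range(n) and range(n-1).
import Mathlib
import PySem

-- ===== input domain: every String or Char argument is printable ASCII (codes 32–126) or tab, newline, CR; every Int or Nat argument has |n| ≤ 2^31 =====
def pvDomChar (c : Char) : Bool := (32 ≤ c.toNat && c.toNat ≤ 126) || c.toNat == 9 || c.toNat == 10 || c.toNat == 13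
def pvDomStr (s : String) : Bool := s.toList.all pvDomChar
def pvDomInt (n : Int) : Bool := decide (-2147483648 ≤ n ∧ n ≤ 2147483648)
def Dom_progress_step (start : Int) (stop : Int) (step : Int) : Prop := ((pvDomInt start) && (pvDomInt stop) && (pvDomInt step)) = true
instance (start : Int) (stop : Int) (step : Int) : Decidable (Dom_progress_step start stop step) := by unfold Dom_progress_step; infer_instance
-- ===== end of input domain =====

-- B computes the node count in closed form ((stop-start)//step + 1) and generates nodes and
-- edges by index arithmetic over range(n), instead of A's while-loop stepping with old_node.

-- ===== PORT A =====
-- A's while-loop: fuel (stop-start).toNat+1 bounds the iteration count whenever the loop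
-- terminates in Python (each iteration needs node ≤ stop; under Pre_ step ≥ 1 so the loop
-- runs at most (stop-start)+1 times).
def progress_step_loopA (stop step : Int) : Nat → Int → Option Int → PySem.Set Int → PySem.Set (Int × Int) → PySem.Set Int × PySem.Set (Int × Int)
  | 0, _, _, nodes, edges => (nodes, edges)
  | fuel + 1, node, old_node, nodes, edges =>
    if node ≤ stop then
      let edges' := match old_node with
        | some o => PySem.Set.add edges (o, node)
        | none => edges
      progress_step_loopA stop step fuel (node + step) (some node) (PySem.Set.add nodes node) edges'
    else (nodes, edges)

def progress_step (start : Int) (stop : Int) (step : Int) : List Int × (List (Int × Int)) :=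
  progress_step_loopA stop step ((stop - start).toNat + 1) start none PySem.Set.empty PySem.Set.empty

-- ===== PORT B =====
-- Source B: n = (stop-start)//step + 1 if step > 0 else 0; nodes and edges are set
-- comprehensions over range(n) and range(n-1) by index arithmetic.
def progress_step_alt (start : Int) (stop : Int) (step : Int) : List Int × (List (Int × Int)) :=
  let n : Int := if 0 < step then PySem.Int.floordiv (stop - start) step + 1 else 0
  (PySem.Set.ofList ((PySem.List.pyRange 0 n 1).map (fun i => start + i * step)),
   PySem.Set.ofList ((PySem.List.pyRange 0 (n - 1) 1).map (fun i => (start + i * step, start + (i + 1) * step))))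

-- ===== PRECONDITION & SPEC =====
-- Pre_ excludes exactly the inputs on which Python A loops forever (the loop body is
-- entered, i.e. start ≤ stop, with a non-positive step); A returns on all other inputs.
def Pre_progress_step (start : Int) (stop : Int) (step : Int) : Prop := stop < start ∨ 0 < step
instance (start : Int) (stop : Int) (step : Int) : Decidable (Pre_progress_step start stop step) := by unfold Pre_progress_step; infer_instance
def pvWitness_progress_step : Int × Int × Int := (0, 10, 3)

def Spec_progress_step (start : Int) (stop : Int) (step : Int) (out : List Int × (List (Int × Int))) : Prop := out = progress_step_alt start stop step
instance (start : Int) (stop : Int) (step : Int) (out : List Int × (List (Int × Int))) : Decidable (Spec_progress_step start stop step out) := by unfold Spec_progress_step; infer_instance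

-- ===== CLAIM (what is proved, stated in full; the proofs are below) =====
def Claim_equal_progress_step : Prop := ∀ (start : Int) (stop : Int) (step : Int), Dom_progress_step start stop step → Pre_progress_step start stop step → Spec_progress_step start stop step (progress_step start stop step)

-- ===== LEMMAS AND PROOFS =====

-- The arithmetic chain A's loop walks.
def pvChain (stop step : Int) : Nat → Int → List Int
  | 0, _ => []
  | fuel + 1, node =>
    if node ≤ stop then node :: pvChain stop step fuel (node + step) else []

-- consecutive pairs of a walk, seeded with an optional predecessor
def pvPairs : Option Int → List Int → List (Int × Int)
  | _, [] => []
  | none, n :: rest => pvPairs (some n) rest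
  | some o, n :: rest => (o, n) :: pvPairs (some n) rest

-- the number of chain elements, in closed form (Int division = ediv here)
def pvCnt (stop step node : Int) : Nat := if node ≤ stop then ((stop - node) / step + 1).toNat else 0

lemma pvChain_lb (stop step : Int) (hstep : 0 < step) :
    ∀ fuel node, ∀ x ∈ pvChain stop step fuel node, node ≤ x := by
  intro fuel
  induction fuel with
  | zero => intro node x hx; simp [pvChain] at hx
  | succ f ih =>
    intro node x hx
    simp only [pvChain] at hx
    split at hx
    · rcases List.mem_cons.mp hx with h | h
      · omega
      · have := ih (node + step) x h; omega
    · simp at hx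

lemma pvChain_pairwise (stop step : Int) (hstep : 0 < step) :
    ∀ fuel node, (pvChain stop step fuel node).Pairwise (· < ·) := by
  intro fuel
  induction fuel with
  | zero => intro node; simp [pvChain]
  | succ f ih =>
    intro node
    simp only [pvChain]
    split
    · exact List.pairwise_cons.mpr ⟨fun x hx => by have := pvChain_lb stop step hstep f (node + step) x hx; omega, ih (node + step)⟩
    · simp

lemma pvChain_nodup (stop step : Int) (hstep : 0 < step) (fuel : Nat) (node : Int) :
    (pvChain stop step fuel node).Nodup :=
  (pvChain_pairwise stop step hstep fuel node).imp (fun h => ne_of_lt h)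

lemma pvPairs_some (o : Int) (l : List Int) : pvPairs (some o) l = (o :: l).zip l := by
  induction l generalizing o with
  | nil => simp [pvPairs]
  | cons n rest ih => simp [pvPairs, List.zip, ih]

lemma pvPairs_none (l : List Int) : pvPairs none l = l.zip (l.drop 1) := by
  cases l with
  | nil => simp [pvPairs]
  | cons n rest => simpa using pvPairs_some n rest

lemma pvPairs_nodup (stop step : Int) (hstep : 0 < step) (fuel : Nat) (node : Int) :
    (pvPairs none (pvChain stop step fuel node)).Nodup := by
  rw [pvPairs_none]
  set l := pvChain stop step fuel node with hl
  have hdrop : (l.drop 1).Nodup := (pvChain_nodup stop step hstep fuel node).sublist (List.drop_sublist 1 l)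
  have hmap : (l.zip (l.drop 1)).map Prod.snd = l.drop 1 := by
    apply List.map_snd_zip
    cases l <;> simp
  have : ((l.zip (l.drop 1)).map Prod.snd).Nodup := by rw [hmap]; exact hdrop
  exact this.of_map

lemma progress_step_loopA_eq (stop step : Int) (hstep : 0 < step) :
    ∀ fuel (node : Int) (old : Option Int) (nodes : PySem.Set Int) (edges : PySem.Set (Int × Int)),
      (∀ x ∈ nodes, x < node) → (∀ p ∈ edges, p.2 < node) →
      (∀ o, old = some o → o < node) →
      progress_step_loopA stop step fuel node old nodes edges =
        (nodes ++ pvChain stop step fuel node, edges ++ pvPairs old (pvChain stop step fuel node)) := by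
  intro fuel
  induction fuel with
  | zero => intro node old nodes edges _ _ _; simp [progress_step_loopA, pvChain, pvPairs]
  | succ f ih =>
    intro node old nodes edges hn he ho
    simp only [progress_step_loopA, pvChain]
    split
    · have hnode_notmem : node ∉ nodes := fun hmem => absurd (hn node hmem) (lt_irrefl node)
      have hadd : PySem.Set.add nodes node = nodes ++ [node] := PySem.Set.add_of_not_mem hnode_notmem
      cases old with
      | none =>
        rw [ih (node + step) (some node) (PySem.Set.add nodes node) edges
              (by intro x hx; rw [hadd] at hx; rcases List.mem_append.mp hx with h | h
                  · have := hn x h; omega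
                  · simp at h; omega)
              (by intro p hp; have := he p hp; omega)
              (by intro o h; injection h with h; omega)]
        simp [hadd, pvPairs]
      | some o =>
        have hedge_notmem : (o, node) ∉ edges := fun hmem => absurd (he (o, node) hmem) (lt_irrefl node)
        have hadde : PySem.Set.add edges (o, node) = edges ++ [(o, node)] := PySem.Set.add_of_not_mem hedge_notmem
        rw [ih (node + step) (some node) (PySem.Set.add nodes node) (PySem.Set.add edges (o, node))
              (by intro x hx; rw [hadd] at hx; rcases List.mem_append.mp hx with h | h
                  · have := hn x h; omega
                  · simp at h; omega)
              (by intro p hp; rw [hadde] at hp; rcases List.mem_append.mp hp with h | h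
                  · have := he p h; omega
                  · simp only [List.mem_singleton] at h; rw [h]; dsimp; omega)
              (by intro o' h; injection h with h; omega)]
        simp [hadd, hadde, pvPairs]
    · simp [pvPairs]

lemma pvCnt_rec (stop step node : Int) (hstep : 0 < step) (hle : node ≤ stop) :
    pvCnt stop step node = pvCnt stop step (node + step) + 1 := by
  unfold pvCnt
  by_cases h2 : node + step ≤ stop
  · have h3 : stop - node = (stop - (node + step)) + 1 * step := by ring
    have h4 : (stop - node) / step = (stop - (node + step)) / step + 1 := by
      rw [h3, Int.add_mul_ediv_right _ _ (ne_of_gt hstep)]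
    have h5 : 0 ≤ (stop - (node + step)) / step := Int.ediv_nonneg (by omega) (le_of_lt hstep)
    simp only [hle, h2, if_true]
    omega
  · have h4 : (stop - node) / step = 0 := Int.ediv_eq_zero_of_lt (by omega) (by omega)
    simp only [hle, h2, if_true, if_false]
    omega

lemma pvChain_eq_map (stop step : Int) (hstep : 0 < step) :
    ∀ fuel node, pvCnt stop step node ≤ fuel →
      pvChain stop step fuel node = (List.range (pvCnt stop step node)).map (fun i : Nat => node + (i : Int) * step) := by
  intro fuel
  induction fuel with
  | zero =>
    intro node h
    have : pvCnt stop step node = 0 := Nat.le_zero.mp h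
    simp [pvChain, this]
  | succ f ih =>
    intro node h
    by_cases hle : node ≤ stop
    · have hrec := pvCnt_rec stop step node hstep hle
      rw [hrec]
      simp only [pvChain, hle, if_true]
      rw [ih (node + step) (by omega)]
      rw [List.range_succ_eq_map, List.map_cons, List.map_map]
      congr 1
      · simp
      · apply List.map_congr_left
        intro i _
        simp only [Function.comp_apply]
        push_cast
        ring
    · have : pvCnt stop step node = 0 := by unfold pvCnt; simp [hle]
      simp [pvChain, hle, this]

lemma pvPairs_none_map_range (f : Nat → Int) (k : Nat) :
    pvPairs none ((List.range k).map f) = (List.range (k - 1)).map (fun i : Nat => (f i, f (i + 1))) := by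
  rw [pvPairs_none]
  apply List.ext_getElem
  · simp
  · intro i h1 h2
    simp [List.getElem_zip]

lemma pvCnt_le_fuel (start stop step : Int) (hstep : 0 < step) :
    pvCnt stop step start ≤ (stop - start).toNat + 1 := by
  unfold pvCnt
  by_cases hle : start ≤ stop
  · have h1 : (stop - start) / step ≤ stop - start := Int.ediv_le_self _ (by omega)
    have h2 : 0 ≤ (stop - start) / step := Int.ediv_nonneg (by omega) (le_of_lt hstep)
    simp only [hle, if_true]
    omega
  · simp [hle]

-- ===== VERDICT (by name: the statement is the Claim_ definition above) =====
theorem progress_step_spec : Claim_equal_progress_step := by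
  intro start stop step _ hpre
  unfold Spec_progress_step progress_step progress_step_alt
  by_cases hstep : 0 < step
  · have hn : (if 0 < step then PySem.Int.floordiv (stop - start) step + 1 else 0) =
        ((stop - start) / step + 1 : Int) := by
      simp only [hstep, if_true, PySem.Int.floordiv_eq_ediv_of_pos hstep]
    set K := pvCnt stop step start with hK
    have hdivneg : stop < start → (stop - start) / step < 0 := by
      intro hlt
      by_contra hge
      push Not at hge
      nlinarith [Int.mul_ediv_add_emod (stop - start) step, Int.emod_nonneg (stop - start) (ne_of_gt hstep),
        mul_nonneg (le_of_lt hstep) hge]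
    have hKnat : ((stop - start) / step + 1 : Int).toNat = K := by
      unfold pvCnt at hK
      by_cases hle : start ≤ stop
      · simp [hK, hle]
      · have := hdivneg (by omega)
        simp only [hK, hle, if_false]
        omega
    have hKnat' : ((stop - start) / step + 1 - 1 : Int).toNat = K - 1 := by
      by_cases hle : start ≤ stop
      · have h2 : 0 ≤ (stop - start) / step := Int.ediv_nonneg (by omega) (le_of_lt hstep)
        omega
      · have := hdivneg (by omega)
        unfold pvCnt at hK
        simp only [hK, hle, if_false]
        omega
    have hchain : pvChain stop step ((stop - start).toNat + 1) start =
        (List.range K).map (fun i : Nat => start + (i : Int) * step) :=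
      pvChain_eq_map stop step hstep _ start (pvCnt_le_fuel start stop step hstep)
    have hB1 : (PySem.List.pyRange 0 ((stop - start) / step + 1) 1).map (fun i => start + i * step) =
        (List.range K).map (fun i : Nat => start + (i : Int) * step) := by
      rw [PySem.List.pyRange_one, List.map_map]
      have h0 : ((stop - start) / step + 1 - 0).toNat = K := by rw [Int.sub_zero]; exact hKnat
      rw [h0]
      apply List.map_congr_left
      intro k _
      simp
    have hB2 : (PySem.List.pyRange 0 ((stop - start) / step + 1 - 1) 1).map (fun i => (start + i * step, start + (i + 1) * step)) =
        (List.range (K - 1)).map (fun i : Nat => ((fun j : Nat => start + (j : Int) * step) i, (fun j : Nat => start + (j : Int) * step) (i + 1))) := by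
      rw [PySem.List.pyRange_one, List.map_map]
      have h0 : ((stop - start) / step + 1 - 1 - 0).toNat = K - 1 := by rw [Int.sub_zero]; exact hKnat'
      rw [h0]
      apply List.map_congr_left
      intro k _
      simp only [Function.comp_apply, Prod.mk.injEq]
      constructor <;> (push_cast; ring)
    rw [progress_step_loopA_eq stop step hstep _ start none PySem.Set.empty PySem.Set.empty
        (by intro x hx; simp [PySem.Set.empty] at hx) (by intro p hp; simp [PySem.Set.empty] at hp)
        (by intro o h; simp at h)]
    simp only [PySem.Set.empty, List.nil_append]
    rw [hn, hB1, hB2, ← pvPairs_none_map_range, ← hchain]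
    rw [PySem.Set.ofList_eq_self_of_nodup _ (pvChain_nodup stop step hstep _ start)]
    rw [PySem.Set.ofList_eq_self_of_nodup _ (pvPairs_nodup stop step hstep _ start)]
  · -- step ≤ 0: Pre_ gives stop < start, so neither side produces anything
    have hlt : stop < start := by
      cases hpre with
      | inl h => exact h
      | inr h => exact absurd h hstep
    have hfuel : ¬ start ≤ stop := by omega
    simp [progress_step_loopA, hfuel, hstep, PySem.List.pyRange_one_eq_nil, PySem.Set.ofList,
      PySem.Set.empty]
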